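-- pv_equiv track=rewrite | github.com/Andrew-Duna/Python-Basics | lesson-1/lesson-2/exercise-6.py | analytics_products
-- ===== SOURCE A (Python) =====
-- def analytics_products(specifications, products):
--     """
--     Формирует словарь для аналитики
--     :param specifications: список характеристик
--     :param products: список продуктов
--     :return: словарь где ключ - характеристика товара, а значение - список значений-характеристик
--     """
--     analytics = {}
--     for item in specifications:
--         my_list = []
--         for i in range(len(products)):
--             my_list.extend(value for key, value in products[i][1].items() if key == item)
--         my_dict = {item: my_list}
--         analytics.update(my_dict)
--     return analytics
-- ===== SOURCE B (Python) =====
-- def analytics_products(specifications, products):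
--     analytics = {s: [] for s in specifications}
--     for _, features in products:
--         for key, value in features.items():
--             if key in analytics:
--                 analytics[key].append(value)
--     return analytics
-- ===== Notes on version B (the rewrite author's own statement) =====
-- stated objective: faster
-- what changed: Pre-seeds an empty bucket per spec, then makes a single scatter pass over products appending each matching feature value, instead of rescanning all products once per spec.
import Mathlib
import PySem

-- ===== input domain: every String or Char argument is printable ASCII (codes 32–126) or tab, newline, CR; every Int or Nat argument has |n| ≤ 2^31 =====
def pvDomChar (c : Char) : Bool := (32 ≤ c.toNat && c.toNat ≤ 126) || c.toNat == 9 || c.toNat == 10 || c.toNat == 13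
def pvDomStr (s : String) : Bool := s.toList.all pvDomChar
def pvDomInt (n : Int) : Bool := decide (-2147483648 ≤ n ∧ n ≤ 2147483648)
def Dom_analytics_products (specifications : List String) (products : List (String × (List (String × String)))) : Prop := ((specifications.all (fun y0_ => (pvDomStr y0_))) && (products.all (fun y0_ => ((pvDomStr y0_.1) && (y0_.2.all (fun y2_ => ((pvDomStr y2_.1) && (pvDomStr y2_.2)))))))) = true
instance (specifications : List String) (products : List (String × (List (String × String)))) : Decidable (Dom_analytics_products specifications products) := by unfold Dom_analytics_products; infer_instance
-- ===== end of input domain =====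

-- B seeds an empty bucket per spec, then one scatter pass over products (faster in a timing run: one pass instead of a rescan per spec).

-- ===== PORT A =====
-- for item in specifications: my_list gathered over range(len(products)); analytics.update({item: my_list})
def analytics_products (specifications : List String) (products : List (String × (List (String × String)))) : List (String × List String) :=
  (specifications.foldl (fun analytics item =>
      let my_list : List String :=
        (PySem.List.pyRange 0 (products.length : Int) 1).foldl
          (fun acc i =>
            acc ++ ((PySem.List.pyGetD products i ("", [])).2.filter (fun kv => kv.1 == item)).map (·.2)) []
      analytics.insert item my_list)
    PySem.Dict.empty).items

-- ===== PORT B =====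
-- analytics = {s: [] for s in specifications}; for _, features in products: for k, v in features: if k in analytics: analytics[k].append(v)
def analytics_products_alt (specifications : List String) (products : List (String × (List (String × String)))) : List (String × List String) :=
  let seed : PySem.Dict String (List String) :=
    specifications.foldl (fun d s => d.insert s []) PySem.Dict.empty
  (products.foldl (fun d p =>
      p.2.foldl (fun d kv =>
        if d.contains kv.1 then d.modify kv.1 [] (· ++ [kv.2]) else d) d)
    seed).items

-- ===== PRECONDITION & SPEC =====
def Spec_analytics_products (specifications : List String) (products : List (String × (List (String × String)))) (out : List (String × List String)) : Prop := out = analytics_products_alt specifications products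
instance (specifications : List String) (products : List (String × (List (String × String)))) (out : List (String × List String)) : Decidable (Spec_analytics_products specifications products out) := by unfold Spec_analytics_products; infer_instance

-- ===== CLAIM (what is proved, stated in full; the proofs are below) =====
def Claim_equal_analytics_products : Prop := ∀ (specifications : List String) (products : List (String × (List (String × String)))), Dom_analytics_products specifications products → Spec_analytics_products specifications products (analytics_products specifications products)

-- ===== LEMMAS AND PROOFS =====

-- the value A gathers for one key, as a fold over the products themselves
def pvGather (products : List (String × (List (String × String)))) (c : String) : List String :=
  products.foldl (fun acc p => acc ++ (p.2.filter (fun kv => kv.1 == c)).map (·.2)) []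

-- fold of inserts where the value depends only on the key
theorem pv_getD_foldl_insert (g : String → List String) (c : String) (l : List String) :
    ∀ (d : PySem.Dict String (List String)),
      (l.foldl (fun d x => d.insert x (g x)) d).getD c [] =
        if c ∈ l then g c else d.getD c [] := by
  induction l with
  | nil => intro d; simp
  | cons x l ih =>
    intro d
    simp only [List.foldl_cons, ih, PySem.Dict.getD_insert, List.mem_cons]
    by_cases h1 : c ∈ l <;> by_cases h2 : c = x <;> simp [h1, h2]

theorem pv_keys_foldl_insert (g : String → List String) (l : List String)
    (d : PySem.Dict String (List String)) :
    (l.foldl (fun d x => d.insert x (g x)) d).keys = PySem.Set.update d.keys l :=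
  PySem.Dict.keys_foldl_insert l (fun _ x => g x) d

-- one product's inner scatter loop
theorem pv_contains_eq_of_keys_eq (d d' : PySem.Dict String (List String))
    (h : d.keys = d'.keys) (c : String) : d.contains c = d'.contains c := by
  by_cases hm : c ∈ d.keys
  · have h1 : d.contains c = true := by rw [PySem.Dict.contains_iff_mem_keys]; exact hm
    have h2 : d'.contains c = true := by rw [PySem.Dict.contains_iff_mem_keys]; rw [← h]; exact hm
    rw [h1, h2]
  · have h1 : ¬ d.contains c = true := by rw [PySem.Dict.contains_iff_mem_keys]; exact hm
    have h2 : ¬ d'.contains c = true := by rw [PySem.Dict.contains_iff_mem_keys]; rw [← h]; exact hm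
    simp only [Bool.not_eq_true] at h1 h2; rw [h1, h2]

theorem pv_scatter1_keys (l : List (String × String)) :
    ∀ (d : PySem.Dict String (List String)),
      (l.foldl (fun d kv => if d.contains kv.1 then d.modify kv.1 [] (· ++ [kv.2]) else d) d).keys
        = d.keys := by
  induction l with
  | nil => intro d; rfl
  | cons kv l ih =>
    intro d
    rw [List.foldl_cons]
    by_cases h : d.contains kv.1 = true
    · rw [if_pos h, ih, PySem.Dict.keys_modify, PySem.Dict.keys_insert_of_contains _ _ h]
    · rw [if_neg h, ih]

theorem pv_scatter1_getD (c : String) (l : List (String × String)) :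
    ∀ (d : PySem.Dict String (List String)),
      (l.foldl (fun d kv => if d.contains kv.1 then d.modify kv.1 [] (· ++ [kv.2]) else d) d).getD c []
        = d.getD c [] ++ (if d.contains c then (l.filter (fun kv => kv.1 == c)).map (·.2) else []) := by
  induction l with
  | nil => intro d; simp
  | cons kv l ih =>
    intro d
    rw [List.foldl_cons]
    by_cases hc : d.contains kv.1 = true
    · rw [if_pos hc, ih]
      have hkeys : (d.modify kv.1 [] (· ++ [kv.2])).contains c = d.contains c := by
        rw [PySem.Dict.contains_modify]
        by_cases he : c = kv.1
        · simp [he, hc]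
        · simp [he]
      rw [hkeys, PySem.Dict.getD_modify]
      by_cases he : c = kv.1
      · subst he
        simp [hc]
      · have hbf : (kv.1 == c) = false := by simp [Ne.symm he]
        simp [he, hbf]
    · rw [if_neg hc, ih]
      by_cases he : c = kv.1
      · subst he
        simp [hc]
      · have hbf : (kv.1 == c) = false := by simp [Ne.symm he]
        simp [hbf]

-- full scatter pass over products
theorem pv_scatter_keys (products : List (String × (List (String × String)))) :
    ∀ (d : PySem.Dict String (List String)),
      (products.foldl (fun d p =>
        p.2.foldl (fun d kv => if d.contains kv.1 then d.modify kv.1 [] (· ++ [kv.2]) else d) d) d).keys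
        = d.keys := by
  induction products with
  | nil => intro d; rfl
  | cons p ps ih => intro d; rw [List.foldl_cons, ih, pv_scatter1_keys]

theorem pv_scatter_getD (c : String) (products : List (String × (List (String × String)))) :
    ∀ (d : PySem.Dict String (List String)),
      (products.foldl (fun d p =>
        p.2.foldl (fun d kv => if d.contains kv.1 then d.modify kv.1 [] (· ++ [kv.2]) else d) d) d).getD c []
        = d.getD c [] ++ (if d.contains c then pvGather products c else []) := by
  induction products with
  | nil => intro d; simp [pvGather]
  | cons p ps ih =>
    intro d
    rw [List.foldl_cons, ih, pv_scatter1_getD]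
    have hk := pv_scatter1_keys p.2 d
    rw [pv_contains_eq_of_keys_eq _ _ hk c]
    by_cases h : d.contains c = true
    · simp [h, pvGather, List.append_assoc]
    · simp only [Bool.not_eq_true] at h; simp [h]

-- A's per-key gathered list equals pvGather
theorem pv_mylist_eq (item : String) (products : List (String × (List (String × String)))) :
    (PySem.List.pyRange 0 (products.length : Int) 1).foldl
      (fun acc i =>
        acc ++ ((PySem.List.pyGetD products i ("", [])).2.filter (fun kv => kv.1 == item)).map (·.2)) []
    = pvGather products item := by
  rw [PySem.List.foldl_pyRange_zero_pyGetD' products ("", [])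
      (fun acc p => acc ++ (p.2.filter (fun kv => kv.1 == item)).map (·.2)) []]
  rfl

theorem pv_keysA (specifications : List String) (g : String → List String) :
    (specifications.foldl (fun d x => d.insert x (g x)) (PySem.Dict.empty : PySem.Dict String (List String))).keys
      = PySem.Set.ofList specifications := by
  rw [pv_keys_foldl_insert]
  simp [PySem.Dict.keys_empty, PySem.Set.update_nil_left]

-- ===== VERDICT (by name: the statement is the Claim_ definition above) =====
theorem analytics_products_spec : Claim_equal_analytics_products := by
  intro specifications products _
  unfold Spec_analytics_products analytics_products analytics_products_alt
  set g : String → List String := fun item =>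
    (PySem.List.pyRange 0 (products.length : Int) 1).foldl
      (fun acc i =>
        acc ++ ((PySem.List.pyGetD products i ("", [])).2.filter (fun kv => kv.1 == item)).map (·.2)) []
    with hg
  have hgG : ∀ item, g item = pvGather products item := fun item => pv_mylist_eq item products
  -- the two dicts
  set dA := specifications.foldl (fun d x => d.insert x (g x)) (PySem.Dict.empty : PySem.Dict String (List String)) with hdA
  set seed := specifications.foldl (fun d s => d.insert s ([] : List String)) (PySem.Dict.empty : PySem.Dict String (List String)) with hseed
  set dB := products.foldl (fun d p =>
      p.2.foldl (fun d kv => if d.contains kv.1 then d.modify kv.1 [] (· ++ [kv.2]) else d) d) seed with hdB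
  have hkA : dA.keys = PySem.Set.ofList specifications := pv_keysA specifications g
  have hkseed : seed.keys = PySem.Set.ofList specifications := pv_keysA specifications (fun _ => [])
  have hkB : dB.keys = PySem.Set.ofList specifications := by
    rw [hdB, pv_scatter_keys, hkseed]
  have hndA : dA.keys.Nodup := by rw [hkA]; exact PySem.Set.nodup_ofList _
  have hndB : dB.keys.Nodup := by rw [hkB]; exact PySem.Set.nodup_ofList _
  rw [PySem.Dict.items_eq_map_keys dA hndA [], PySem.Dict.items_eq_map_keys dB hndB [],
      hkA, hkB]
  apply List.map_congr_left
  intro c hc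
  have hcs : c ∈ specifications := (PySem.Set.mem_ofList _ _).mp hc
  have hA : dA.getD c [] = g c := by
    rw [hdA, pv_getD_foldl_insert g c specifications, if_pos hcs]
  have hseedD : seed.getD c [] = [] := by
    rw [hseed, pv_getD_foldl_insert (fun _ => []) c specifications]
    simp
  have hcont : seed.contains c = true := by
    rw [PySem.Dict.contains_iff_mem_keys, hkseed]; exact hc
  have hB : dB.getD c [] = pvGather products c := by
    rw [hdB, pv_scatter_getD, hseedD, hcont]; simp
  rw [hA, hB, hgG]
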